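-- pv_equiv track=rewrite | github.com/acabrol/judo | src/generate_markdown.py | organize_techniques
-- ===== SOURCE A (Python) =====
-- def organize_techniques(rows: list[dict[str, str | None]]) -> dict[str, dict[str, list[dict[str, str | None]]]]:
--     organized: dict[str, dict[str, list[dict[str, str | None]]]] = {}
--     for row in rows:
--         main_category = row["main_category-name"]
--         subcategory = row["subcategory-name"]
--         if not main_category or not subcategory:
--             continue
--         organized.setdefault(main_category, {}).setdefault(subcategory, []).append(row)
--     return organized
-- ===== SOURCE B (Python) =====
-- def organize_techniques(rows: list[dict[str, str | None]]) -> dict[str, dict[str, list[dict[str, str | None]]]]: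
--     M, S = "main_category-name", "subcategory-name"
--     valid = [r for r in rows if r[M] and r[S]]
--     return {
--         m: {
--             s: [r for r in valid if r[M] == m and r[S] == s]
--             for s in dict.fromkeys(r2[S] for r2 in valid if r2[M] == m)
--         }
--         for m in dict.fromkeys(r2[M] for r2 in valid)
--     }
-- ===== Notes on version B (the rewrite author's own statement) =====
-- stated objective: alternative
-- what changed: A builds the nested dict in one pass with chained setdefault/append; B first filters valid rows, then builds the result by comprehension: first-occurrence key lists via dict.fromkeys and per-(main,sub) filters of the valid rows.
import Mathlib
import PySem

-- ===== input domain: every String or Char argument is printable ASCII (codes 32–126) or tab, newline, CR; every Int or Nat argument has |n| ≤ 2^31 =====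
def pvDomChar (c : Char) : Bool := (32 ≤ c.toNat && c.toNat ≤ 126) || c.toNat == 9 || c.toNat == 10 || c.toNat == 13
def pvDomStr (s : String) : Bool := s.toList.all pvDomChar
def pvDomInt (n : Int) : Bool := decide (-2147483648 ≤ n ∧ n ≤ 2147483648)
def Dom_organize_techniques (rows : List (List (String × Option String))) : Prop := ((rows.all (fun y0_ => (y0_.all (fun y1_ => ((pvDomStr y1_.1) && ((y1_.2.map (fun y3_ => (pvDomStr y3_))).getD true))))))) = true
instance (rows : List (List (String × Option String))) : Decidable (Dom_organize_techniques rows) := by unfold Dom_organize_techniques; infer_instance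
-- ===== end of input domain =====

-- B replaces A's one-pass setdefault/append accumulation by a filter + first-occurrence-key
-- grouping built with dedup and per-key filters (same output, different decomposition).


abbrev PvRow := List (String × Option String)

-- shared lookup of a row field; `none` also stands for a missing key (excluded by Pre_)
def pvGetv (row : PvRow) (k : String) : Option String :=
  (List.lookup k row).getD none

-- Python truthiness of a `str | None` value
def pvTruthy : Option String → Bool
  | none => false
  | some s => !(s == "")

def pvMain (row : PvRow) : String := (pvGetv row "main_category-name").getD ""
def pvSub (row : PvRow) : String := (pvGetv row "subcategory-name").getD ""

-- ===== PORT A =====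
-- organized.setdefault(main, {}).setdefault(sub, []).append(row), written on assoc lists
def pvUpdInner (s : String) (row : PvRow) : List (String × List PvRow) → List (String × List PvRow)
  | [] => [(s, [row])]
  | (k, v) :: t => if k == s then (k, v ++ [row]) :: t else (k, v) :: pvUpdInner s row t

def pvUpdOuter (m s : String) (row : PvRow) :
    List (String × List (String × List PvRow)) → List (String × List (String × List PvRow))
  | [] => [(m, [(s, [row])])]
  | (k, g) :: t => if k == m then (k, pvUpdInner s row g) :: t else (k, g) :: pvUpdOuter m s row t

def pvStep (org : List (String × List (String × List PvRow))) (row : PvRow) :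
    List (String × List (String × List PvRow)) :=
  let mc := pvGetv row "main_category-name"
  let sc := pvGetv row "subcategory-name"
  if pvTruthy mc && pvTruthy sc then pvUpdOuter (mc.getD "") (sc.getD "") row org else org

def organize_techniques (rows : List (List (String × Option String))) :
    List (String × List (String × List (List (String × Option String)))) :=
  rows.foldl pvStep []

-- ===== PORT B =====
def pvValidRow (row : PvRow) : Bool :=
  pvTruthy (pvGetv row "main_category-name") && pvTruthy (pvGetv row "subcategory-name")

def organize_techniques_alt (rows : List (List (String × Option String))) :
    List (String × List (String × List (List (String × Option String)))) :=
  let valid := rows.filter pvValidRow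
  (PySem.List.dedup (valid.map pvMain)).map (fun m =>
    (m, (PySem.List.dedup (((valid.filter (fun r2 => pvMain r2 == m)).map pvSub))).map (fun s =>
      (s, valid.filter (fun r => pvMain r == m && pvSub r == s)))))

-- ===== PRECONDITION & SPEC =====
-- A raises KeyError when a row lacks either category key; Pre_ requires both keys in every row.
def Pre_organize_techniques (rows : List (List (String × Option String))) : Prop :=
  (rows.all (fun r => (List.lookup "main_category-name" r).isSome
    && (List.lookup "subcategory-name" r).isSome)) = true
instance (rows : List (List (String × Option String))) : Decidable (Pre_organize_techniques rows) := by
  unfold Pre_organize_techniques; infer_instance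

def pvWitness_organize_techniques : (List (List (String × Option String))) :=
  [[("main_category-name", some "a"), ("subcategory-name", some "b")]]

def Spec_organize_techniques (rows : List (List (String × Option String))) (out : List (String × List (String × List (List (String × Option String))))) : Prop := out = organize_techniques_alt rows
instance (rows : List (List (String × Option String))) (out : List (String × List (String × List (List (String × Option String))))) : Decidable (Spec_organize_techniques rows out) := by
  unfold Spec_organize_techniques
  letI d3 : DecidableEq (String × List (List (String × Option String))) := instDecidableEqProd
  letI d5 : DecidableEq (String × List (String × List (List (String × Option String)))) := instDecidableEqProd
  letI d6 : DecidableEq (List (String × List (String × List (List (String × Option String))))) := instDecidableEqList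
  exact d6 _ _

-- ===== CLAIM (what is proved, stated in full; the proofs are below) =====
def Claim_equal_organize_techniques : Prop := ∀ (rows : List (List (String × Option String))), Dom_organize_techniques rows → Pre_organize_techniques rows → Spec_organize_techniques rows (organize_techniques rows)

-- ===== LEMMAS AND PROOFS =====

-- the inner-group builder of B, for one main key m over the valid rows V
def pvG (V : List PvRow) (m : String) : List (String × List PvRow) :=
  (PySem.List.dedup (((V.filter (fun r2 => pvMain r2 == m)).map pvSub))).map (fun s =>
    (s, V.filter (fun r => pvMain r == m && pvSub r == s)))

lemma pvB_eq (rows : List PvRow) :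
    organize_techniques_alt rows =
      (PySem.List.dedup ((rows.filter pvValidRow).map pvMain)).map
        (fun m => (m, pvG (rows.filter pvValidRow) m)) := rfl

lemma dedup_append {α : Type} [DecidableEq α] (l : List α) (a : α) :
    PySem.List.dedup (l ++ [a]) = if a ∈ l then PySem.List.dedup l else PySem.List.dedup l ++ [a] := by
  simp [PySem.List.dedup_eq_ofList, PySem.Set.ofList_append_singleton, PySem.Set.add,
    PySem.Set.contains, PySem.Set.mem_ofList]

lemma updInner_map_mem (r : PvRow) (f f' : String → List PvRow)
    (hne : ∀ t, t ≠ pvSub r → f' t = f t) (hs : f' (pvSub r) = f (pvSub r) ++ [r]) :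
    ∀ D : List String, D.Nodup → pvSub r ∈ D →
      pvUpdInner (pvSub r) r (D.map (fun t => (t, f t))) = D.map (fun t => (t, f' t)) := by
  intro D
  induction D with
  | nil => intro _ h; cases h
  | cons t T ih =>
    intro hnd hmem
    by_cases ht : t = pvSub r
    · subst ht
      simp only [List.map_cons, pvUpdInner, beq_self_eq_true, if_true, hs]
      have hT : ∀ u ∈ T, u ≠ pvSub r := fun u hu e => (List.nodup_cons.mp hnd).1 (e ▸ hu)
      have hmap : T.map (fun u => (u, f u)) = T.map (fun u => (u, f' u)) := by
        apply List.map_congr_left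
        intro u hu; rw [hne u (hT u hu)]
      rw [hmap]
    · have hmem' : pvSub r ∈ T := by
        cases hmem with
        | head => exact absurd rfl ht
        | tail _ h => exact h
      simp only [List.map_cons, pvUpdInner, beq_iff_eq, ht, if_false,
        ih (List.nodup_cons.mp hnd).2 hmem', hne t ht]

lemma updInner_map_not_mem (r : PvRow) (f f' : String → List PvRow)
    (hne : ∀ t, t ≠ pvSub r → f' t = f t) :
    ∀ D : List String, pvSub r ∉ D →
      pvUpdInner (pvSub r) r (D.map (fun t => (t, f t))) =
        D.map (fun t => (t, f' t)) ++ [(pvSub r, [r])] := by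
  intro D
  induction D with
  | nil => intro _; rfl
  | cons t T ih =>
    intro hmem
    have ht : t ≠ pvSub r := fun e => hmem (e ▸ List.mem_cons_self)
    simp only [List.map_cons, pvUpdInner, beq_iff_eq, ht, if_false,
      ih (fun h => hmem (List.mem_cons_of_mem _ h)), hne t ht, List.cons_append]

lemma inner_step (W : List PvRow) (r : PvRow) :
    pvUpdInner (pvSub r) r
      ((PySem.List.dedup (W.map pvSub)).map (fun s => (s, W.filter (fun q => pvSub q == s)))) =
    (PySem.List.dedup ((W ++ [r]).map pvSub)).map
      (fun s => (s, (W ++ [r]).filter (fun q => pvSub q == s))) := by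
  have hfil : ∀ s, (W ++ [r]).filter (fun q => pvSub q == s) =
      W.filter (fun q => pvSub q == s) ++ (if pvSub r = s then [r] else []) := by
    intro s
    rw [List.filter_append, List.filter_singleton]
    by_cases h : pvSub r = s <;> simp [Bool.cond_eq_ite, beq_iff_eq, h]
  have hne : ∀ t, t ≠ pvSub r →
      (fun s => (W ++ [r]).filter (fun q => pvSub q == s)) t =
      (fun s => W.filter (fun q => pvSub q == s)) t := by
    intro t ht
    simp only [hfil t, if_neg (Ne.symm ht), List.append_nil]
  have hs : (fun s => (W ++ [r]).filter (fun q => pvSub q == s)) (pvSub r) =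
      (fun s => W.filter (fun q => pvSub q == s)) (pvSub r) ++ [r] := by
    simp [hfil (pvSub r)]
  simp only [List.map_append, List.map_cons, List.map_nil]
  rw [dedup_append]
  by_cases hmem : pvSub r ∈ W.map pvSub
  · rw [if_pos hmem]
    exact updInner_map_mem r _ _ hne hs _ (PySem.List.nodup_dedup _)
      (by simp [hmem])
  · rw [if_neg hmem, List.map_append]
    have hnil : W.filter (fun q => pvSub q == pvSub r) = [] := by
      rw [List.filter_eq_nil_iff]
      intro q hq hb
      exact hmem (List.mem_map.mpr ⟨q, hq, (beq_iff_eq.mp hb)⟩)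
    have := updInner_map_not_mem r _ _ hne (PySem.List.dedup (W.map pvSub))
      (by simp [hmem])
    rw [this]
    simp [hnil]

lemma pvG_eq (V : List PvRow) (m : String) :
    pvG V m = (PySem.List.dedup (((V.filter (fun r2 => pvMain r2 == m)).map pvSub))).map
      (fun s => (s, (V.filter (fun r2 => pvMain r2 == m)).filter (fun q => pvSub q == s))) := by
  unfold pvG
  apply List.map_congr_left
  intro s _
  rw [List.filter_filter]
  congr 1
  apply List.filter_congr
  intro x _
  rw [Bool.and_comm]

lemma pvG_step_eq (V : List PvRow) (r : PvRow) :
    pvG (V ++ [r]) (pvMain r) = pvUpdInner (pvSub r) r (pvG V (pvMain r)) := by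
  have hW : (V ++ [r]).filter (fun r2 => pvMain r2 == pvMain r) =
      V.filter (fun r2 => pvMain r2 == pvMain r) ++ [r] := by
    rw [List.filter_append, List.filter_singleton]; simp [Bool.cond_eq_ite]
  rw [pvG_eq, pvG_eq, hW, inner_step]

lemma pvG_step_ne (V : List PvRow) (r : PvRow) (t : String) (ht : t ≠ pvMain r) :
    pvG (V ++ [r]) t = pvG V t := by
  have hW : (V ++ [r]).filter (fun r2 => pvMain r2 == t) =
      V.filter (fun r2 => pvMain r2 == t) := by
    rw [List.filter_append, List.filter_singleton]
    simp [Bool.cond_eq_ite, beq_iff_eq, Ne.symm ht]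
  rw [pvG_eq, pvG_eq, hW]

lemma updOuter_map_mem (r : PvRow) :
    ∀ (V : List PvRow) (D : List String), D.Nodup → pvMain r ∈ D →
      pvUpdOuter (pvMain r) (pvSub r) r (D.map (fun m => (m, pvG V m))) =
        D.map (fun m => (m, pvG (V ++ [r]) m)) := by
  intro V D
  induction D with
  | nil => intro _ h; cases h
  | cons t T ih =>
    intro hnd hmem
    by_cases ht : t = pvMain r
    · subst ht
      simp only [List.map_cons, pvUpdOuter, beq_self_eq_true, if_true, ← pvG_step_eq]
      have hmap : T.map (fun m => (m, pvG V m)) = T.map (fun m => (m, pvG (V ++ [r]) m)) := by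
        apply List.map_congr_left
        intro u hu
        rw [pvG_step_ne V r u (fun e => (List.nodup_cons.mp hnd).1 (e ▸ hu))]
      rw [hmap]
    · have hmem' : pvMain r ∈ T := by
        cases hmem with
        | head => exact absurd rfl ht
        | tail _ h => exact h
      simp only [List.map_cons, pvUpdOuter, beq_iff_eq, ht, if_false,
        ih (List.nodup_cons.mp hnd).2 hmem', pvG_step_ne V r t ht]

lemma updOuter_map_not_mem (r : PvRow) :
    ∀ (V : List PvRow) (D : List String), pvMain r ∉ D →
      pvUpdOuter (pvMain r) (pvSub r) r (D.map (fun m => (m, pvG V m))) =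
        D.map (fun m => (m, pvG (V ++ [r]) m)) ++ [(pvMain r, [(pvSub r, [r])])] := by
  intro V D
  induction D with
  | nil => intro _; rfl
  | cons t T ih =>
    intro hmem
    have ht : t ≠ pvMain r := fun e => hmem (e ▸ List.mem_cons_self)
    simp only [List.map_cons, pvUpdOuter, beq_iff_eq, ht, if_false,
      ih (fun h => hmem (List.mem_cons_of_mem _ h)), pvG_step_ne V r t ht, List.cons_append]

lemma outer_step (V : List PvRow) (r : PvRow) :
    pvUpdOuter (pvMain r) (pvSub r) r
      ((PySem.List.dedup (V.map pvMain)).map (fun m => (m, pvG V m))) =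
    (PySem.List.dedup ((V ++ [r]).map pvMain)).map (fun m => (m, pvG (V ++ [r]) m)) := by
  simp only [List.map_append, List.map_cons, List.map_nil]
  rw [dedup_append]
  by_cases hmem : pvMain r ∈ V.map pvMain
  · rw [if_pos hmem]
    exact updOuter_map_mem r V _ (PySem.List.nodup_dedup _) (by simp [hmem])
  · rw [if_neg hmem, List.map_append]
    rw [updOuter_map_not_mem r V _ (by simp [hmem])]
    have hG : pvG (V ++ [r]) (pvMain r) = [(pvSub r, [r])] := by
      rw [pvG_step_eq]
      have hnil : V.filter (fun r2 => pvMain r2 == pvMain r) = [] := by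
        rw [List.filter_eq_nil_iff]
        intro q hq hb
        exact hmem (List.mem_map.mpr ⟨q, hq, (beq_iff_eq.mp hb)⟩)
      rw [pvG_eq, hnil]
      rfl
    simp [hG]

lemma pvStep_valid (r : PvRow) (org : List (String × List (String × List PvRow)))
    (hv : pvValidRow r = true) : pvStep org r = pvUpdOuter (pvMain r) (pvSub r) r org := by
  unfold pvValidRow at hv
  rw [show pvStep org r = if (pvTruthy (pvGetv r "main_category-name")
        && pvTruthy (pvGetv r "subcategory-name")) = true
      then pvUpdOuter (pvMain r) (pvSub r) r org else org from rfl, if_pos hv]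

lemma pvStep_invalid (r : PvRow) (org : List (String × List (String × List PvRow)))
    (hv : pvValidRow r = false) : pvStep org r = org := by
  unfold pvValidRow at hv
  rw [show pvStep org r = if (pvTruthy (pvGetv r "main_category-name")
        && pvTruthy (pvGetv r "subcategory-name")) = true
      then pvUpdOuter (pvMain r) (pvSub r) r org else org from rfl,
    if_neg (by rw [hv]; exact Bool.false_ne_true)]

lemma main_eq (rows : List PvRow) :
    organize_techniques rows = organize_techniques_alt rows := by
  induction rows using List.reverseRecOn with
  | nil => rfl
  | append_singleton l r ih =>
    have hfold : organize_techniques (l ++ [r]) = pvStep (organize_techniques l) r := by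
      unfold organize_techniques
      rw [List.foldl_append]
      rfl
    by_cases hv : pvValidRow r = true
    · have hfilter : (l ++ [r]).filter pvValidRow = l.filter pvValidRow ++ [r] := by
        rw [List.filter_append, List.filter_singleton, hv]
        rfl
      rw [hfold, ih, pvStep_valid r _ hv, pvB_eq, pvB_eq, hfilter]
      exact outer_step (l.filter pvValidRow) r
    · have hfilter : (l ++ [r]).filter pvValidRow = l.filter pvValidRow := by
        rw [List.filter_append, List.filter_singleton,
          Bool.of_not_eq_true hv]
        simp
      rw [hfold, ih, pvStep_invalid r _ (Bool.of_not_eq_true hv), pvB_eq, pvB_eq, hfilter]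

-- ===== VERDICT (by name: the statement is the Claim_ definition above) =====
theorem organize_techniques_spec : Claim_equal_organize_techniques := by
  intro rows _ _
  unfold Spec_organize_techniques
  exact main_eq rows
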